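-- pv_equiv track=rewrite | github.com/open-pulse/opps | opps/io/pcf/pcf_handler.py | group_structures
-- ===== SOURCE A (Python) =====
-- from itertools import pairwise
--
-- def group_structures(lines_list):
--     structures_list = []
--     index_list = []
--     lines_list.append("")
--
--     for i, line in enumerate(lines_list):
--         if line[0:4] != "    ":
--             index_list.append(i)
--     for a, b in pairwise(index_list):
--         structures_list.append(lines_list[a:b])
--
--     return structures_list
-- ===== SOURCE B (Python) =====
-- def group_structures(lines_list):
--     lines_list.append("")
--     structures_list = []
--     current = None
--     for line in lines_list:
--         if line[0:4] != "    ":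
--             if current is not None:
--                 structures_list.append(current)
--             current = [line]
--         else:
--             if current is not None:
--                 current.append(line)
--     return structures_list
-- ===== Notes on version B (the rewrite author's own statement) =====
-- stated objective: alternative
-- what changed: Replaces A's two-pass index-list + pairwise-slicing with a single pass that maintains a current group and flushes it at each non-indented boundary (B performs the same lines_list.append("") mutation as A).
import Mathlib
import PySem

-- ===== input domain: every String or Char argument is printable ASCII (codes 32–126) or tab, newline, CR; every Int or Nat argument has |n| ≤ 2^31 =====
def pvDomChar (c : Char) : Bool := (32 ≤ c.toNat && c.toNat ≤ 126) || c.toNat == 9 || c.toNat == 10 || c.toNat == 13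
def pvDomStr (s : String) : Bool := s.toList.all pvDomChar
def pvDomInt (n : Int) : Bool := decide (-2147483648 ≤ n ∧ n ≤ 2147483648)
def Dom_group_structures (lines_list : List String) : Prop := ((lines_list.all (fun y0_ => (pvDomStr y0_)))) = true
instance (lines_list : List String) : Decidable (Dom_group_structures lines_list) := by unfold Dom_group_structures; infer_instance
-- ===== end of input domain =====

-- B replaces A's two-pass index-list + pairwise-slicing with a single accumulator pass (alternative, same cost).
-- Both A and B mutate the argument identically (append ""); the equivalence proved is about the return value.

-- ===== PORT A =====
def group_structures (lines_list : List String) : List (List String) :=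
  let lines := lines_list ++ [""]
  let index_list := (PySem.List.enumerate lines).foldl
    (fun acc p => if PySem.Str.slice p.2 (some 0) (some 4) ≠ "    " then acc ++ [p.1] else acc)
    ([] : List Int)
  (index_list.zip index_list.tail).foldl
    (fun acc p => acc ++ [PySem.List.slice lines (some p.1) (some p.2)]) []

-- ===== PORT B =====
def pvLoopB (structures : List (List String)) (current : Option (List String)) :
    List String → List (List String)
  | [] => structures
  | line :: rest =>
    if PySem.Str.slice line (some 0) (some 4) ≠ "    " then
      pvLoopB (match current with | some g => structures ++ [g] | none => structures) (some [line]) rest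
    else
      pvLoopB structures (match current with | some g => some (g ++ [line]) | none => none) rest

def group_structures_alt (lines_list : List String) : List (List String) :=
  pvLoopB [] none (lines_list ++ [""])

-- ===== PRECONDITION & SPEC =====
def Spec_group_structures (lines_list : List String) (out : List (List String)) : Prop := out = group_structures_alt lines_list
instance (lines_list : List String) (out : List (List String)) : Decidable (Spec_group_structures lines_list out) := by unfold Spec_group_structures; infer_instance

-- ===== CLAIM (what is proved, stated in full; the proofs are below) =====
def Claim_equal_group_structures : Prop := ∀ (lines_list : List String), Dom_group_structures lines_list → Spec_group_structures lines_list (group_structures lines_list)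

-- ===== LEMMAS AND PROOFS =====

/-- Absolute indices (starting at `n`) of the non-indented lines. -/
def pvIdx (n : Nat) : List String → List Nat
  | [] => []
  | l :: ls => if PySem.Str.slice l (some 0) (some 4) ≠ "    " then n :: pvIdx (n + 1) ls
               else pvIdx (n + 1) ls

/-- Accumulator-free form of B's loop. -/
def pvAux (current : Option (List String)) : List String → List (List String)
  | [] => []
  | l :: ls =>
    if PySem.Str.slice l (some 0) (some 4) ≠ "    " then
      (match current with | some g => [g] | none => []) ++ pvAux (some [l]) ls
    else
      pvAux (match current with | some g => some (g ++ [l]) | none => none) ls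

/-- Nat-index slice, what A's Python slice computes on its in-range indices. -/
def pvSliceN (xs : List String) (a b : Nat) : List String := (xs.drop a).take (b - a)

theorem pvLoopB_eq_aux (ls : List String) (S : List (List String)) (cur : Option (List String)) :
    pvLoopB S cur ls = S ++ pvAux cur ls := by
  induction ls generalizing S cur with
  | nil => simp [pvLoopB, pvAux]
  | cons l ls ih =>
    by_cases h : PySem.Str.slice l (some 0) (some 4) = "    " <;>
      cases cur <;> simp [pvLoopB, pvAux, h, ih]

theorem pvEnum_fold (ls : List String) (n : Nat) (acc : List Int) :
    (PySem.List.enumerate ls (n : Int)).foldl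
      (fun acc p => if PySem.Str.slice p.2 (some 0) (some 4) ≠ "    " then acc ++ [p.1] else acc) acc
    = acc ++ (pvIdx n ls).map (fun k => Int.ofNat k) := by
  induction ls generalizing n acc with
  | nil => simp [PySem.List.enumerate_nil, pvIdx]
  | cons l ls ih =>
    have hc : (n : Int) + 1 = ((n + 1 : Nat) : Int) := by push_cast; ring
    rw [PySem.List.enumerate_cons, List.foldl_cons, hc]
    by_cases h : PySem.Str.slice l (some 0) (some 4) = "    "
    · simp only [h, ne_eq, not_true_eq_false, if_false]
      rw [ih]
      simp [pvIdx, h]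
    · simp only [h, ne_eq, not_false_eq_true, if_true]
      rw [ih]
      simp [pvIdx, h, List.append_assoc]

theorem pvCastZip (xs : List String) :
    ∀ (idx : List Nat),
    ((idx.map (fun k => Int.ofNat k)).zip ((idx.map (fun k => Int.ofNat k)).tail)).map
      (fun p => PySem.List.slice xs (some p.1) (some p.2))
    = (idx.zip idx.tail).map (fun r => pvSliceN xs r.1 r.2)
  | [] => by simp
  | [a] => by simp
  | a :: b :: t => by
    simp only [List.map_cons, List.tail_cons, List.zip_cons_cons]
    have hrec := pvCastZip xs (b :: t)
    simp only [List.map_cons, List.tail_cons] at hrec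
    rw [hrec]
    simp [PySem.List.slice_natCast, pvSliceN]

theorem pvMain (ls : List String) (pre g : List String) (p q : Nat)
    (hp : p = pre.length) (hq : q = p + g.length) :
    ((p :: pvIdx q ls).zip (pvIdx q ls)).map
      (fun r => pvSliceN (pre ++ g ++ ls) r.1 r.2) = pvAux (some g) ls := by
  induction ls generalizing pre g p q with
  | nil => simp [pvIdx, pvAux]
  | cons l ls ih =>
    by_cases h : PySem.Str.slice l (some 0) (some 4) = "    "
    · -- indented line: absorb l into the current group
      have := ih (pre) (g ++ [l]) p (q + 1) hp (by simp [hq]; omega)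
      simp only [pvIdx, pvAux, h, ne_eq, not_true_eq_false, if_false]
      simpa only [List.append_assoc, List.singleton_append] using this
    · -- boundary line: flush g, open the group [l]
      simp only [pvIdx, pvAux, h, ne_eq, not_false_eq_true, if_true,
        List.zip_cons_cons, List.map_cons, List.singleton_append]
      refine congrArg₂ List.cons ?_ ?_
      · subst hp hq
        simp only [pvSliceN, Nat.add_sub_cancel_left]
        rw [show pre ++ g ++ l :: ls = pre ++ (g ++ l :: ls) from by simp, List.drop_left]
        exact List.take_left' rfl
      · have := ih (pre ++ g) [l] q (q + 1) (by simp [hp, hq]) (by simp)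
        simpa only [List.append_assoc, List.singleton_append] using this

theorem pvTop (ls : List String) (pre : List String) (p : Nat) (hp : p = pre.length) :
    ((pvIdx p ls).zip (pvIdx p ls).tail).map
      (fun r => pvSliceN (pre ++ ls) r.1 r.2) = pvAux none ls := by
  induction ls generalizing pre p with
  | nil => simp [pvIdx, pvAux]
  | cons l ls ih =>
    by_cases h : PySem.Str.slice l (some 0) (some 4) = "    "
    · have := ih (pre ++ [l]) (p + 1) (by simp [hp])
      simp only [pvIdx, pvAux, h, ne_eq, not_true_eq_false, if_false]
      simpa only [List.append_assoc, List.singleton_append] using this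
    · have := pvMain ls pre [l] p (p + 1) hp (by simp)
      simp only [pvIdx, pvAux, h, ne_eq, not_false_eq_true, if_true, List.tail_cons,
        List.nil_append]
      simpa only [List.append_assoc, List.singleton_append] using this

-- ===== VERDICT (by name: the statement is the Claim_ definition above) =====
theorem group_structures_spec : Claim_equal_group_structures := by
  intro L _
  unfold Spec_group_structures group_structures_alt
  rw [pvLoopB_eq_aux, List.nil_append]
  show (((PySem.List.enumerate (L ++ [""]) ((0 : Nat) : Int)).foldl
      (fun acc p => if PySem.Str.slice p.2 (some 0) (some 4) ≠ "    " then acc ++ [p.1] else acc)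
      []).zip
      ((PySem.List.enumerate (L ++ [""]) ((0 : Nat) : Int)).foldl
      (fun acc p => if PySem.Str.slice p.2 (some 0) (some 4) ≠ "    " then acc ++ [p.1] else acc)
      []).tail).foldl
      (fun acc p => acc ++ [PySem.List.slice (L ++ [""]) (some p.1) (some p.2)]) []
    = pvAux none (L ++ [""])
  rw [pvEnum_fold, List.nil_append, PySem.List.foldl_append_singleton_eq_map, pvCastZip]
  exact pvTop (L ++ [""]) [] 0 (by simp)
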